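-- pv_equiv track=rewrite | github.com/maisonnat/ax-ejemplo | use_cases/risk_scoring/calculator.py | calculate_weighted_incidents
-- ===== SOURCE A (Python) =====
-- from typing import Dict, List, Optional, Tuple, Any
--
-- THREAT_WEIGHTS: Dict[str, int] = {
--     "ransomware-attack": 100,
--     "data-exposure-message": 80,
--     "infostealer-credential": 70,
--     "corporate-credential-leak": 60,
--     "malware": 50,
--     "phishing": 50,
--     "fake-mobile-app": 40,
--     "fraudulent-brand-use": 20,
--     "similar-domain-name": 15,
--     "dw-activity": 30,
--     "data-exposure": 40,
--     "default": 10
-- }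
--
-- def calculate_weighted_incidents(
--     tickets: List[Dict],
--     exclude_discarded: bool = False
-- ) -> Tuple[int, int, Dict[str, Dict[str, int]]]:
--     """
--     Calculate weighted incident score based on threat severity.
--     """
--     breakdown: Dict[str, Dict[str, int]] = {}
--
--     for ticket in tickets:
--         if exclude_discarded:
--             resolution = ticket.get("current", {}).get("resolution")
--             if resolution == "discarded":
--                 continue
--
--         ticket_type = ticket.get("detection", {}).get("type", "unknown")
--         weight = THREAT_WEIGHTS.get(ticket_type, THREAT_WEIGHTS["default"])
--
--         if ticket_type not in breakdown:
--             breakdown[ticket_type] = {"count": 0, "weight": weight, "score": 0}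
--
--         breakdown[ticket_type]["count"] += 1
--         breakdown[ticket_type]["score"] += weight
--
--     total_count = sum(info["count"] for info in breakdown.values())
--     weighted_score = sum(info["score"] for info in breakdown.values())
--
--     return weighted_score, total_count, breakdown
-- ===== SOURCE B (Python) =====
-- from typing import Dict, List, Tuple
--
-- THREAT_WEIGHTS: Dict[str, int] = {
--     "ransomware-attack": 100,
--     "data-exposure-message": 80,
--     "infostealer-credential": 70,
--     "corporate-credential-leak": 60,
--     "malware": 50,
--     "phishing": 50,
--     "fake-mobile-app": 40,
--     "fraudulent-brand-use": 20,
--     "similar-domain-name": 15,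
--     "dw-activity": 30,
--     "data-exposure": 40,
--     "default": 10
-- }
--
-- def calculate_weighted_incidents(
--     tickets: List[Dict],
--     exclude_discarded: bool = False
-- ) -> Tuple[int, int, Dict[str, Dict[str, int]]]:
--     # Project the input down to the flat list of kept ticket types.
--     kept = [
--         t.get("detection", {}).get("type", "unknown")
--         for t in tickets
--         if not (exclude_discarded
--                 and t.get("current", {}).get("resolution") == "discarded")
--     ]
--     # Distinct types in first-occurrence order, without any dict: a list
--     # grown by membership scans.
--     order: List[str] = []
--     for t in kept:
--         if t not in order:
--             order.append(t)
--     # One breakdown entry per distinct type; the count is recomputed by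
--     # scanning the kept list (list.count), not accumulated per ticket.
--     breakdown: Dict[str, Dict[str, int]] = {}
--     weighted_score = 0
--     for t in order:
--         n = kept.count(t)
--         w = THREAT_WEIGHTS.get(t, THREAT_WEIGHTS["default"])
--         breakdown[t] = {"count": n, "weight": w, "score": n * w}
--         weighted_score += n * w
--     return weighted_score, len(kept), breakdown
-- ===== Notes on version B (the rewrite author's own statement) =====
-- stated objective: alternative
-- what changed: A makes one pass mutating per-type breakdown records (create, then increment count and score for every ticket) and finally re-sums the breakdown; B never accumulates per ticket: it projects tickets to a flat list of kept types, dedups it by membership scans into a first-occurrence order list, then for each distinct type recomputes its count with list.count over the kept list and builds the breakdown entry and total by multiplication, with total_count taken as len(kept).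
import Mathlib
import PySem

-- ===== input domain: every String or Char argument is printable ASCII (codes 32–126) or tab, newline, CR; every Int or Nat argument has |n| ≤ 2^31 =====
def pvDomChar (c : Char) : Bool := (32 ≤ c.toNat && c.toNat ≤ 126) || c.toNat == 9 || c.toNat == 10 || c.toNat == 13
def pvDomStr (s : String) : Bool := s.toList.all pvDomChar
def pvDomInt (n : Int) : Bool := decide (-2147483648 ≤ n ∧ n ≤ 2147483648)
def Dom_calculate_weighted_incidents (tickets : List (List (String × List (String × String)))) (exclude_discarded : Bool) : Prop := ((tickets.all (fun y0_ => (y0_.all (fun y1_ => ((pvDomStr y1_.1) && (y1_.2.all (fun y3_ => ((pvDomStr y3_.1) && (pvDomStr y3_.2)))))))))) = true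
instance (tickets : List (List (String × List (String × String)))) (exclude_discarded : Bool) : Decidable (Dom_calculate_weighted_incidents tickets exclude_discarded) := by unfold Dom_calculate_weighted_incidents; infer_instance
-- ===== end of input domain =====

-- B replaces A's per-ticket breakdown mutation by: project to the kept type list,
-- dedup it by membership scans, then recompute each type's count with list.count;
-- an alternative decomposition of the same task; the RETURN value is proved equal.

-- shared module-level constant (both Pythons carry the same THREAT_WEIGHTS table)
def pvTHREAT_WEIGHTS : PySem.Dict String Int := PySem.Dict.ofList
  [("ransomware-attack", 100), ("data-exposure-message", 80), ("infostealer-credential", 70),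
   ("corporate-credential-leak", 60), ("malware", 50), ("phishing", 50), ("fake-mobile-app", 40),
   ("fraudulent-brand-use", 20), ("similar-domain-name", 15), ("dw-activity", 30),
   ("data-exposure", 40), ("default", 10)]

-- THREAT_WEIGHTS.get(t, THREAT_WEIGHTS["default"]); the "default" key is present in the
-- literal table, so the outer `.getD 0` of the inner lookup never fires.
def pvWeight (t : String) : Int :=
  pvTHREAT_WEIGHTS.getD t ((pvTHREAT_WEIGHTS.get? "default").getD 0)

-- exclude_discarded and ticket.get("current", {}).get("resolution") == "discarded"
def pvSkip (exclude_discarded : Bool) (tk : List (String × List (String × String))) : Bool :=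
  exclude_discarded &&
    ((PySem.Dict.mk ((PySem.Dict.mk tk).getD "current" [])).get? "resolution" == some "discarded")

-- ticket.get("detection", {}).get("type", "unknown")
def pvType (tk : List (String × List (String × String))) : String :=
  (PySem.Dict.mk ((PySem.Dict.mk tk).getD "detection" [])).getD "type" "unknown"

-- ===== PORT A =====
def calculate_weighted_incidents (tickets : List (List (String × List (String × String)))) (exclude_discarded : Bool) : Int × Int × (List (String × List (String × Int))) :=
  let breakdown : PySem.Dict String (PySem.Dict String Int) :=
    tickets.foldl (fun b tk =>
      if pvSkip exclude_discarded tk then b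
      else
        let t := pvType tk
        let w := pvWeight t
        let b := if b.contains t = false
                 then b.insert t (PySem.Dict.mk [("count", 0), ("weight", w), ("score", 0)])
                 else b
        -- breakdown[t]["count"] += 1 ; breakdown[t]["score"] += w  (t is present, so the
        -- outer/inner getD defaults of Dict.modify never fire)
        let b := b.modify t PySem.Dict.empty (fun inner => inner.modify "count" 0 (· + 1))
        b.modify t PySem.Dict.empty (fun inner => inner.modify "score" 0 (· + w)))
      PySem.Dict.empty
  let total_count := (breakdown.values.map (fun info => info.getD "count" 0)).sum
  let weighted_score := (breakdown.values.map (fun info => info.getD "score" 0)).sum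
  (weighted_score, total_count, breakdown.items.map (fun p => (p.1, p.2.items)))

-- ===== PORT B =====
def calculate_weighted_incidents_alt (tickets : List (List (String × List (String × String)))) (exclude_discarded : Bool) : Int × Int × (List (String × List (String × Int))) :=
  -- kept = [type of t for t in tickets if not skipped]
  let kept : List String :=
    tickets.filterMap (fun tk => if pvSkip exclude_discarded tk then none else some (pvType tk))
  -- order: distinct types, first-occurrence order, grown by membership scans
  let order : List String :=
    kept.foldl (fun o t => if o.contains t then o else o ++ [t]) []
  -- one breakdown entry per distinct type, count recomputed by list.count
  let r :=
    order.foldl (fun acc t =>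
      let n : Int := kept.count t
      let w := pvWeight t
      (acc.1 + n * w,
       acc.2.insert t (PySem.Dict.mk [("count", n), ("weight", w), ("score", n * w)])))
      ((0 : Int), (PySem.Dict.empty : PySem.Dict String (PySem.Dict String Int)))
  (r.1, (kept.length : Int), r.2.items.map (fun p => (p.1, p.2.items)))

-- ===== PRECONDITION & SPEC =====
def Spec_calculate_weighted_incidents (tickets : List (List (String × List (String × String)))) (exclude_discarded : Bool) (out : Int × Int × (List (String × List (String × Int)))) : Prop := out = calculate_weighted_incidents_alt tickets exclude_discarded
instance (tickets : List (List (String × List (String × String)))) (exclude_discarded : Bool) (out : Int × Int × (List (String × List (String × Int)))) : Decidable (Spec_calculate_weighted_incidents tickets exclude_discarded out) := by unfold Spec_calculate_weighted_incidents; infer_instance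

-- ===== CLAIM (what is proved, stated in full; the proofs are below) =====
def Claim_equal_calculate_weighted_incidents : Prop := ∀ (tickets : List (List (String × List (String × String)))) (exclude_discarded : Bool), Dom_calculate_weighted_incidents tickets exclude_discarded → Spec_calculate_weighted_incidents tickets exclude_discarded (calculate_weighted_incidents tickets exclude_discarded)

-- ===== LEMMAS AND PROOFS =====

-- the type list A and B effectively iterate over: kept tickets' types, in order
def pvKept (tickets : List (List (String × List (String × String)))) (exclude_discarded : Bool) : List String :=
  tickets.filterMap (fun tk => if pvSkip exclude_discarded tk then none else some (pvType tk))

-- A's loop body for one kept ticket type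
def pvStepA (b : PySem.Dict String (PySem.Dict String Int)) (t : String) : PySem.Dict String (PySem.Dict String Int) :=
  let w := pvWeight t
  let b := if b.contains t = false
           then b.insert t (PySem.Dict.mk [("count", 0), ("weight", w), ("score", 0)])
           else b
  let b := b.modify t PySem.Dict.empty (fun inner => inner.modify "count" 0 (· + 1))
  b.modify t PySem.Dict.empty (fun inner => inner.modify "score" 0 (· + pvWeight t))

-- the canonical inner breakdown entry for type t with count n
def pvInner (t : String) (n : Int) : PySem.Dict String Int :=
  PySem.Dict.mk [("count", n), ("weight", pvWeight t), ("score", n * pvWeight t)]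

lemma pvFoldA_eq (tickets : List (List (String × List (String × String)))) (exclude_discarded : Bool) :
    tickets.foldl (fun b tk =>
      if pvSkip exclude_discarded tk then b
      else
        let t := pvType tk
        let w := pvWeight t
        let b := if b.contains t = false
                 then b.insert t (PySem.Dict.mk [("count", 0), ("weight", w), ("score", 0)])
                 else b
        let b := b.modify t PySem.Dict.empty (fun inner => inner.modify "count" 0 (· + 1))
        b.modify t PySem.Dict.empty (fun inner => inner.modify "score" 0 (· + w)))
      PySem.Dict.empty
    = (pvKept tickets exclude_discarded).foldl pvStepA PySem.Dict.empty := by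
  unfold pvKept
  rw [List.foldl_filterMap]
  congr 1
  funext b tk
  by_cases h : pvSkip exclude_discarded tk <;> simp [h, pvStepA]

-- one A-step on an already-present entry: count+1 and score+w turn pvInner t n into pvInner t (n+1)
lemma pvInner_step (t : String) (n : Int) :
    ((pvInner t n).modify "count" 0 (· + 1)).modify "score" 0 (· + pvWeight t)
      = pvInner t (n + 1) := by
  apply PySem.Dict.ext
  simp [pvInner, PySem.Dict.modify, PySem.Dict.insert, PySem.Dict.contains, PySem.Dict.getD,
        PySem.Dict.get?]
  ring

-- characterisation of A's breakdown after the whole loop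
lemma pvFoldA_items (ts : List String) :
    (ts.foldl pvStepA PySem.Dict.empty).items
      = (PySem.Set.ofList ts).map (fun k => (k, pvInner k (ts.count k))) := by
  induction ts using List.reverseRecOn with
  | nil => simp [PySem.Set.ofList, PySem.Dict.empty]
  | append_singleton ts t ih =>
      have hD : ts.foldl pvStepA PySem.Dict.empty
          = PySem.Dict.mk ((PySem.Set.ofList ts).map (fun k => (k, pvInner k (ts.count k)))) :=
        PySem.Dict.ext ih
      have hofL : PySem.Set.ofList (ts ++ [t]) = PySem.Set.add (PySem.Set.ofList ts) t := by
        simp [PySem.Set.ofList_eq_foldl, List.foldl_append]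
      have hkeys : (PySem.Dict.mk ((PySem.Set.ofList ts).map (fun k => (k, pvInner k (ts.count k))))).keys
          = PySem.Set.ofList ts := by
        simp [PySem.Dict.keys_mk, Function.comp_def]
      have hnd : (PySem.Set.ofList ts).Nodup := PySem.Set.nodup_ofList ts
      have hcont : (PySem.Dict.mk ((PySem.Set.ofList ts).map (fun k => (k, pvInner k (ts.count k))))).contains t
          = decide (t ∈ ts) := by
        rw [PySem.Dict.contains_eq_decide_mem_keys, hkeys]
        simp [PySem.Set.mem_ofList]
      rw [List.foldl_append, List.foldl_cons, List.foldl_nil, hD, hofL]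
      unfold pvStepA
      by_cases h : t ∈ ts
      · -- t already has a breakdown entry: no insert, the two modifies bump count and score
        have hmem : t ∈ PySem.Set.ofList ts := (PySem.Set.mem_ofList ts t).2 h
        have hget : (PySem.Dict.mk ((PySem.Set.ofList ts).map (fun k => (k, pvInner k (ts.count k))))).getD t PySem.Dict.empty
            = pvInner t (ts.count t) := by
          apply PySem.Dict.getD_of_mem_items
          · exact List.mem_map_of_mem hmem
          · rw [hkeys]; exact hnd
        have hstep := pvInner_step t (ts.count t)
        simp only [PySem.Dict.modify] at hstep
        simp only [hcont, h, decide_true, Bool.true_eq_false, if_false,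
          PySem.Dict.modify, PySem.Dict.getD_insert_self, PySem.Dict.insert_insert_self, hget,
          hstep]
        rw [PySem.Dict.items_insert_of_contains _ _ (by rw [hcont]; simp [h]),
            PySem.Set.add_of_mem hmem, List.map_map]
        apply List.map_congr_left
        intro k hk
        by_cases hkt : k = t
        · subst hkt
          simp [List.count_append]
        · simp [Function.comp, hkt, List.count_append,
            (by simpa [eq_comm] using hkt : ¬ t = k)]
      · -- fresh type: the entry is created with count 0 / score 0 and then bumped once
        have hinit : (PySem.Dict.mk [("count", (0:Int)), ("weight", pvWeight t), ("score", 0)])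
            = pvInner t 0 := by simp [pvInner]
        have hstep := pvInner_step t 0
        simp only [PySem.Dict.modify] at hstep
        simp only [hcont, h, decide_false, if_true, hinit,
          PySem.Dict.modify, PySem.Dict.getD_insert_self, PySem.Dict.insert_insert_self,
          hstep]
        rw [PySem.Dict.items_insert_of_not_contains _ _ (by rw [hcont]; simp [h]),
            PySem.Set.add_of_not_mem (fun hm => h ((PySem.Set.mem_ofList ts t).1 hm))]
        simp only [List.map_append, List.map_cons, List.map_nil]
        refine congrArg₂ (· ++ ·) ?_ ?_
        · apply List.map_congr_left
          intro k hk
          have hkt : k ≠ t := fun e => h (e ▸ (PySem.Set.mem_ofList ts k).1 hk)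
          simp [List.count_append, (by simpa [eq_comm] using hkt : ¬ t = k)]
        · simp [List.count_append, List.count_eq_zero.2 h]

-- Σ over a nodup list of the indicator of one element
lemma pvSumInd (L : List String) (t : String) (hnd : L.Nodup) :
    (L.map (fun k => if t = k then (1 : Int) else 0)).sum = if t ∈ L then 1 else 0 := by
  induction L with
  | nil => simp
  | cons a L ih =>
      simp only [List.nodup_cons] at hnd
      rw [List.map_cons, List.sum_cons, ih hnd.2]
      by_cases h : t = a
      · subst h
        simp [hnd.1]
      · simp [h]

-- Σ of per-type counts over the distinct types = length
lemma pvSumCount (ts : List String) :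
    ((PySem.Set.ofList ts).map (fun k => (ts.count k : Int))).sum = ts.length := by
  induction ts using List.reverseRecOn with
  | nil => simp [PySem.Set.ofList]
  | append_singleton ts t ih =>
      have hofL : PySem.Set.ofList (ts ++ [t]) = PySem.Set.add (PySem.Set.ofList ts) t := by
        simp [PySem.Set.ofList_eq_foldl, List.foldl_append]
      have hnd : (PySem.Set.ofList ts).Nodup := PySem.Set.nodup_ofList ts
      rw [hofL]
      by_cases h : t ∈ ts
      · have hmem : t ∈ PySem.Set.ofList ts := (PySem.Set.mem_ofList ts t).2 h
        rw [PySem.Set.add_of_mem hmem]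
        have : ∀ k, ((ts ++ [t]).count k : Int)
            = (ts.count k : Int) + (if t = k then 1 else 0) := by
          intro k; by_cases hk : t = k <;> simp [List.count_append, hk]
        calc ((PySem.Set.ofList ts).map (fun k => ((ts ++ [t]).count k : Int))).sum
            = ((PySem.Set.ofList ts).map (fun k => (ts.count k : Int))).sum
              + ((PySem.Set.ofList ts).map (fun k => if t = k then (1:Int) else 0)).sum := by
              rw [← List.sum_map_add]; exact congrArg _ (List.map_congr_left (fun k _ => this k))
          _ = (ts.length : Int) + 1 := by
              rw [ih, pvSumInd _ _ hnd]; simp [hmem]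
          _ = ((ts ++ [t]).length : Int) := by simp
      · rw [PySem.Set.add_of_not_mem (fun hm => h ((PySem.Set.mem_ofList ts t).1 hm))]
        rw [List.map_append, List.sum_append]
        have heq : (PySem.Set.ofList ts).map (fun k => ((ts ++ [t]).count k : Int))
            = (PySem.Set.ofList ts).map (fun k => (ts.count k : Int)) := by
          apply List.map_congr_left
          intro k hk
          have hkt : k ≠ t := fun e => h (e ▸ (PySem.Set.mem_ofList ts k).1 hk)
          simp [List.count_append, (by simpa [eq_comm] using hkt : ¬ t = k)]
        rw [heq, ih]
        simp [List.count_append, List.count_eq_zero.2 h]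

-- characterisation of B's breakdown loop
lemma pvFoldB_loop (kept : List String) (L : List String) (a : Int)
    (bd : PySem.Dict String (PySem.Dict String Int))
    (hnd : L.Nodup) (hfresh : ∀ t ∈ L, bd.contains t = false) :
    L.foldl (fun acc t =>
      let n : Int := kept.count t
      let w := pvWeight t
      (acc.1 + n * w,
       acc.2.insert t (PySem.Dict.mk [("count", n), ("weight", w), ("score", n * w)])))
      (a, bd)
    = (a + (L.map (fun t => (kept.count t : Int) * pvWeight t)).sum,
       PySem.Dict.mk (bd.items ++ L.map (fun t => (t, pvInner t (kept.count t))))) := by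
  induction L generalizing a bd with
  | nil => simp
  | cons t L ih =>
      simp only [List.nodup_cons] at hnd
      have hft : bd.contains t = false := hfresh t (by simp)
      have hfresh' : ∀ q ∈ L,
          (bd.insert t (PySem.Dict.mk [("count", (kept.count t : Int)), ("weight", pvWeight t), ("score", (kept.count t : Int) * pvWeight t)])).contains q = false := by
        intro q hq
        rw [PySem.Dict.contains_insert]
        have : q ≠ t := fun e => hnd.1 (e ▸ hq)
        simp [this, hfresh q (by simp [hq])]
      rw [List.foldl_cons]
      rw [ih _ _ hnd.2 hfresh']
      rw [PySem.Dict.items_insert_of_not_contains _ _ hft]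
      simp only [List.map_cons, List.sum_cons, pvInner]
      refine Prod.ext (by ring) ?_
      simp [List.append_assoc]

-- ===== VERDICT (by name: the statement is the Claim_ definition above) =====
theorem calculate_weighted_incidents_spec : Claim_equal_calculate_weighted_incidents := by
  intro tickets ex _
  unfold Spec_calculate_weighted_incidents calculate_weighted_incidents calculate_weighted_incidents_alt
  rw [pvFoldA_eq]
  have hkept : tickets.filterMap (fun tk => if pvSkip ex tk then none else some (pvType tk))
      = pvKept tickets ex := rfl
  have hA := pvFoldA_items (pvKept tickets ex)
  have hord : (pvKept tickets ex).foldl (fun o t => if o.contains t then o else o ++ [t]) []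
      = PySem.Set.ofList (pvKept tickets ex) := by
    rw [PySem.Set.ofList_eq_foldl]
    rfl
  have hnd : (PySem.Set.ofList (pvKept tickets ex)).Nodup := PySem.Set.nodup_ofList _
  have hfresh : ∀ t ∈ PySem.Set.ofList (pvKept tickets ex),
      (PySem.Dict.empty : PySem.Dict String (PySem.Dict String Int)).contains t = false := by
    intro t _; simp [PySem.Dict.contains_empty]
  dsimp only
  rw [hkept, hord, pvFoldB_loop _ _ _ _ hnd hfresh]
  simp only [PySem.Dict.empty] at hA
  simp only [PySem.Dict.empty, hA, PySem.Dict.values, List.map_map, List.nil_append, zero_add]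
  refine Prod.ext ?_ (Prod.ext ?_ ?_)
  · simp [Function.comp_def, pvInner, PySem.Dict.getD, PySem.Dict.get?]
  · have := pvSumCount (pvKept tickets ex)
    simpa [Function.comp_def, pvInner, PySem.Dict.getD, PySem.Dict.get?] using this
  · simp [Function.comp_def, pvInner]
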